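-- pv_equiv track=rewrite | github.com/mjhalwa/usdb_syncer | src/usdb_syncer/resource_dl.py | is_domain_allowed
-- ===== SOURCE A (Python) =====
-- def is_domain_allowed(test_domain: str) -> bool:
--     domain_white_list = [
--         f"{sub}{domain}"
--         for sub in ["", "www."]
--         for domain in [
--           # videos/audios
--           "youtube.com",
--           "youtu.be",
--           "vimeo.com",
--           "dailymotion.com",
--           "universal-music.de",
--           # covers/backgrounds
--           "images.fanart.tv",
--           "fanart.tv"]
--     ]
--
--     return test_domain in domain_white_list
-- ===== SOURCE B (Python) =====
-- _BASE_DOMAINS = frozenset([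
--     "youtube.com",
--     "youtu.be",
--     "vimeo.com",
--     "dailymotion.com",
--     "universal-music.de",
--     "images.fanart.tv",
--     "fanart.tv",
-- ])
--
--
-- def is_domain_allowed(test_domain: str) -> bool:
--     if test_domain.startswith("www."):
--         test_domain = test_domain[4:]
--     return test_domain in _BASE_DOMAINS
-- ===== Notes on version B (the rewrite author's own statement) =====
-- stated objective: simpler
-- what changed: Instead of enumerating all 14 prefixed whitelist entries via a nested comprehension and scanning that list, B strips one optional leading www-dot subdomain prefix (a single 4-character slice) and tests membership in a fixed frozenset of the 7 base domains.
import Mathlib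
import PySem

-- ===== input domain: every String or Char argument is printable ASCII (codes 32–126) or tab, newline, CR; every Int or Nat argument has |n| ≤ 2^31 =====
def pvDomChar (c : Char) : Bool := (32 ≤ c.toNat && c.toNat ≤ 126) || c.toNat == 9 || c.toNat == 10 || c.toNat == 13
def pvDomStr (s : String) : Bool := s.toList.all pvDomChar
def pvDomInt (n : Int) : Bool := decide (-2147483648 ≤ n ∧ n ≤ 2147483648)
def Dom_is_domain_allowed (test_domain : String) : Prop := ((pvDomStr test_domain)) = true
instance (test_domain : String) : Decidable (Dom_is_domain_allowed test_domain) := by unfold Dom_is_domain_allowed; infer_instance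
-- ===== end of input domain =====

-- B replaces A's 14-entry nested-comprehension whitelist scan by stripping one optional
-- leading www-dot prefix and testing membership in the 7 base domains (simpler; return value only).

-- ===== PORT A =====
def is_domain_allowed (test_domain : String) : Bool :=
  let domain_white_list : List String :=
    (["", "www."].flatMap (fun sub =>
      ["youtube.com", "youtu.be", "vimeo.com", "dailymotion.com",
       "universal-music.de", "images.fanart.tv", "fanart.tv"].map
        (fun domain => sub ++ domain)))
  domain_white_list.contains test_domain

-- ===== PORT B =====
def pvBaseDomains : List String :=
  ["youtube.com", "youtu.be", "vimeo.com", "dailymotion.com",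
   "universal-music.de", "images.fanart.tv", "fanart.tv"]

def is_domain_allowed_alt (test_domain : String) : Bool :=
  let d := if PySem.Str.startswith test_domain "www." then PySem.Str.slice test_domain (some 4) none
           else test_domain
  pvBaseDomains.contains d

-- ===== PRECONDITION & SPEC =====
def Spec_is_domain_allowed (test_domain : String) (out : Bool) : Prop := out = is_domain_allowed_alt test_domain
instance (test_domain : String) (out : Bool) : Decidable (Spec_is_domain_allowed test_domain out) := by unfold Spec_is_domain_allowed; infer_instance

-- ===== CLAIM =====
def Claim_equal_is_domain_allowed : Prop := ∀ (test_domain : String), Dom_is_domain_allowed test_domain → Spec_is_domain_allowed test_domain (is_domain_allowed test_domain)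

-- ===== LEMMAS AND PROOFS =====
lemma pv_contains_toList (L : List String) (s : String) :
    L.contains s = (L.map String.toList).contains s.toList := by
  induction L with
  | nil => rfl
  | cons a t ih =>
      simp only [List.contains_cons, List.map_cons, ih]
      congr 1
      simp [String.toList_inj]

lemma pvKey (l : List Char) :
    ([ "youtube.com".toList, "youtu.be".toList, "vimeo.com".toList, "dailymotion.com".toList,
       "universal-music.de".toList, "images.fanart.tv".toList, "fanart.tv".toList,
       "www.youtube.com".toList, "www.youtu.be".toList, "www.vimeo.com".toList,
       "www.dailymotion.com".toList, "www.universal-music.de".toList,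
       "www.images.fanart.tv".toList, "www.fanart.tv".toList] : List (List Char)).contains l
    = ([ "youtube.com".toList, "youtu.be".toList, "vimeo.com".toList, "dailymotion.com".toList,
        "universal-music.de".toList, "images.fanart.tv".toList, "fanart.tv".toList] :
        List (List Char)).contains
        (if PySem.Chars.startswith l "www.".toList = true then l.drop 4 else l) := by
  by_cases h : PySem.Chars.startswith l "www.".toList = true
  · obtain ⟨rest, hrest⟩ := (PySem.Chars.startswith_iff _ _).mp h
    subst hrest
    have h2 : PySem.Chars.startswith ('w' :: 'w' :: 'w' :: '.' :: rest) ['w', 'w', 'w', '.'] = true :=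
      (PySem.Chars.startswith_iff _ _).mpr ⟨rest, rfl⟩
    simp [h2]
  · have hne : ∀ m : List Char, "www.".toList <+: m → l ≠ m := fun m hm e =>
      h ((PySem.Chars.startswith_iff _ _).mpr (e ▸ hm))
    have h' : PySem.Chars.startswith l ['w', 'w', 'w', '.'] = false := by
      simpa using h
    have e1 : decide (l = ['w', 'w', 'w', '.', 'y', 'o', 'u', 't', 'u', 'b', 'e', '.', 'c', 'o', 'm']) = false := decide_eq_false (hne _ (by decide))
    have e2 : decide (l = ['w', 'w', 'w', '.', 'y', 'o', 'u', 't', 'u', '.', 'b', 'e']) = false := decide_eq_false (hne _ (by decide))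
    have e3 : decide (l = ['w', 'w', 'w', '.', 'v', 'i', 'm', 'e', 'o', '.', 'c', 'o', 'm']) = false := decide_eq_false (hne _ (by decide))
    have e4 : decide (l = ['w', 'w', 'w', '.', 'd', 'a', 'i', 'l', 'y', 'm', 'o', 't', 'i', 'o', 'n', '.', 'c', 'o', 'm']) = false := decide_eq_false (hne _ (by decide))
    have e5 : decide (l = ['w', 'w', 'w', '.', 'u', 'n', 'i', 'v', 'e', 'r', 's', 'a', 'l', '-', 'm', 'u', 's', 'i', 'c', '.', 'd', 'e']) = false := decide_eq_false (hne _ (by decide))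
    have e6 : decide (l = ['w', 'w', 'w', '.', 'i', 'm', 'a', 'g', 'e', 's', '.', 'f', 'a', 'n', 'a', 'r', 't', '.', 't', 'v']) = false := decide_eq_false (hne _ (by decide))
    have e7 : decide (l = ['w', 'w', 'w', '.', 'f', 'a', 'n', 'a', 'r', 't', '.', 't', 'v']) = false := decide_eq_false (hne _ (by decide))
    simp [h', e1, e2, e3, e4, e5, e6, e7]

-- ===== VERDICT =====
theorem is_domain_allowed_spec : Claim_equal_is_domain_allowed := by
  intro s _hdom
  unfold Spec_is_domain_allowed
  simp only [is_domain_allowed, is_domain_allowed_alt, pvBaseDomains,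
    List.flatMap, List.map, List.flatten,
    String.empty_append, PySem.Str.startswith_eq]
  rw [pv_contains_toList, pv_contains_toList, apply_ite String.toList]
  have hslice : (PySem.Str.slice s (some 4) none).toList = s.toList.drop 4 := by
    simp only [PySem.Str.toList_slice, PySem.Chars.slice_eq_listSlice, Nat.ofNat_nonneg,
      PySem.List.slice_from, Int.reduceToNat]
  rw [hslice]
  exact pvKey s.toList
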